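-- pv_equiv track=rewrite | github.com/chanbi-raining/TIL | 2019-02-10 algorithm implementation_1x1 size square.py | gridify
-- ===== SOURCE A (Python) =====
-- def gridify(moves):
--     grid = (0, 0)
--     grids = {grid}
--     edges = set()
--     for i in moves:
--         if i == 'U':
--             edge = (grid[0], grid[1], grid[0], grid[1] + 1)
--             grid = edge[-2:]
--         elif i == 'D':
--             edge = (grid[0], grid[1] - 1, grid[0], grid[1])
--             grid = edge[:2]
--         elif i == 'R':
--             edge = (grid[0], grid[1], grid[0] + 1, grid[1])
--             grid = edge[-2:]
--         else:
--             edge = (grid[0] - 1, grid[1], grid[0], grid[1])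
--             grid = edge[:2]
--         grids.add(grid)
--         edges.add(edge)
--     return sorted(list(grids)), edges
-- ===== SOURCE B (Python) =====
-- def _leaf(c):
--     # summary of a one-move segment: (displacement, points after start, edges), all relative to the segment start
--     if c == 'U':
--         return (0, 1), [(0, 1)], [(0, 0, 0, 1)]
--     if c == 'D':
--         return (0, -1), [(0, -1)], [(0, -1, 0, 0)]
--     if c == 'R':
--         return (1, 0), [(1, 0)], [(0, 0, 1, 0)]
--     return (-1, 0), [(-1, 0)], [(-1, 0, 0, 0)]
--
--
-- def _summarize(seg):
--     # divide and conquer: summarize each half, translate the right summary by the left displacement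
--     if len(seg) == 1:
--         return _leaf(seg[0])
--     mid = len(seg) // 2
--     (dx1, dy1), p1, e1 = _summarize(seg[:mid])
--     (dx2, dy2), p2, e2 = _summarize(seg[mid:])
--     return ((dx1 + dx2, dy1 + dy2),
--             p1 + [(x + dx1, y + dy1) for x, y in p2],
--             e1 + [(a + dx1, b + dy1, u + dx1, v + dy1) for a, b, u, v in e2])
--
--
-- def gridify(moves):
--     if not moves:
--         return [(0, 0)], set()
--     _, pts, edges = _summarize(moves)
--     return sorted(set([(0, 0)] + pts)), set(edges)
-- ===== Notes on version B (the rewrite author's own statement) =====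
-- stated objective: alternative
-- what changed: Replaces A's left-to-right stateful simulation by a divide-and-conquer over the move string: each segment is reduced to a composable summary (net displacement, points and edges relative to the segment start) and halves are merged by translating the right summary by the left displacement.
import Mathlib
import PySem

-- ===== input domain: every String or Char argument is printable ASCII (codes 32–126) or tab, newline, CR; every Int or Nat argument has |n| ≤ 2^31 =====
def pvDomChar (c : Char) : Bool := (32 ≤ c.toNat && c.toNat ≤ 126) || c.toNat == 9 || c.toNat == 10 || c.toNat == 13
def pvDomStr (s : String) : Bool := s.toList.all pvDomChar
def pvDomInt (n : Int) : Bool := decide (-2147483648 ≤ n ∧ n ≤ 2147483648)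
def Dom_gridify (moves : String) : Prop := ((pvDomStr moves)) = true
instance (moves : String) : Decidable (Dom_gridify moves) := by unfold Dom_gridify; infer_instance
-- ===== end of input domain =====

-- B replaces A's left-to-right stateful simulation by divide-and-conquer segment
-- summaries (displacement, relative points, relative edges) merged by translation;
-- objective: alternative algorithm, same value.

-- ===== PORT A =====
def aStep (st : (Int × Int) × PySem.Set (Int × Int) × PySem.Set (Int × Int × Int × Int)) (i : Char) :
    (Int × Int) × PySem.Set (Int × Int) × PySem.Set (Int × Int × Int × Int) :=
  let grid := st.1
  let p :=
    if i = 'U' then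
      let e := (grid.1, grid.2, grid.1, grid.2 + 1); (e, (e.2.2.1, e.2.2.2))  -- grid = edge[-2:]
    else if i = 'D' then
      let e := (grid.1, grid.2 - 1, grid.1, grid.2); (e, (e.1, e.2.1))        -- grid = edge[:2]
    else if i = 'R' then
      let e := (grid.1, grid.2, grid.1 + 1, grid.2); (e, (e.2.2.1, e.2.2.2))
    else
      let e := (grid.1 - 1, grid.2, grid.1, grid.2); (e, (e.1, e.2.1))
  (p.2, PySem.Set.add st.2.1 p.2, PySem.Set.add st.2.2 p.1)

def gridify (moves : String) : (List (Int × Int)) × (List (Int × Int × Int × Int)) :=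
  let st := moves.toList.foldl aStep (((0, 0) : Int × Int), PySem.Set.ofList [((0, 0) : Int × Int)], PySem.Set.empty)
  (PySem.List.sorted2 st.2.1 (fun g => g.1) (fun g => g.2), st.2.2)

-- ===== PORT B =====
-- summary of a one-move segment: (displacement, points after start, edges), relative to the segment start
def bLeaf (c : Char) : (Int × Int) × List (Int × Int) × List (Int × Int × Int × Int) :=
  if c = 'U' then ((0, 1), [(0, 1)], [(0, 0, 0, 1)])
  else if c = 'D' then ((0, -1), [(0, -1)], [(0, -1, 0, 0)])
  else if c = 'R' then ((1, 0), [(1, 0)], [(0, 0, 1, 0)])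
  else ((-1, 0), [(-1, 0)], [(-1, 0, 0, 0)])

-- divide and conquer: summarize each half, translate the right summary by the left displacement.
-- (the [] case is unreachable from gridify_alt, which handles the empty string before calling)
def bSummarize : List Char → (Int × Int) × List (Int × Int) × List (Int × Int × Int × Int)
  | [] => ((0, 0), [], [])
  | [c] => bLeaf c
  | (c1 :: c2 :: cs) =>
    let mid := (c1 :: c2 :: cs).length / 2
    let s1 := bSummarize ((c1 :: c2 :: cs).take mid)
    let s2 := bSummarize ((c1 :: c2 :: cs).drop mid)
    let d1 := s1.1
    ((d1.1 + s2.1.1, d1.2 + s2.1.2),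
     s1.2.1 ++ s2.2.1.map (fun p => (p.1 + d1.1, p.2 + d1.2)),
     s1.2.2 ++ s2.2.2.map (fun e => (e.1 + d1.1, e.2.1 + d1.2, e.2.2.1 + d1.1, e.2.2.2 + d1.2)))
termination_by l => l.length
decreasing_by
  · simp only [List.length_take, List.length_cons]; omega
  · simp only [List.length_drop, List.length_cons]; omega

def gridify_alt (moves : String) : (List (Int × Int)) × (List (Int × Int × Int × Int)) :=
  match moves.toList with
  | [] => ([((0 : Int), (0 : Int))], [])
  | l =>
    let s := bSummarize l
    (PySem.List.sorted2 (PySem.Set.ofList (((0, 0) : Int × Int) :: s.2.1)) (fun g => g.1) (fun g => g.2),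
     PySem.Set.ofList s.2.2)

-- ===== PRECONDITION & SPEC =====
def Spec_gridify (moves : String) (out : (List (Int × Int)) × (List (Int × Int × Int × Int))) : Prop := out = gridify_alt moves
instance (moves : String) (out : (List (Int × Int)) × (List (Int × Int × Int × Int))) : Decidable (Spec_gridify moves out) := by unfold Spec_gridify; infer_instance

-- ===== CLAIM =====
def Claim_equal_gridify : Prop := ∀ (moves : String), Dom_gridify moves → Spec_gridify moves (gridify moves)

-- ===== LEMMAS AND PROOFS =====

-- the step move and A's edge, as reference functions for the induction
def pmove (g : Int × Int) (c : Char) : Int × Int :=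
  if c = 'U' then (g.1, g.2 + 1) else if c = 'D' then (g.1, g.2 - 1)
  else if c = 'R' then (g.1 + 1, g.2) else (g.1 - 1, g.2)

def aedge (g : Int × Int) (c : Char) : Int × Int × Int × Int :=
  if c = 'U' then (g.1, g.2, g.1, g.2 + 1) else if c = 'D' then (g.1, g.2 - 1, g.1, g.2)
  else if c = 'R' then (g.1, g.2, g.1 + 1, g.2) else (g.1 - 1, g.2, g.1, g.2)

def tpath (g : Int × Int) : List Char → List (Int × Int)
  | [] => []
  | c :: cs => pmove g c :: tpath (pmove g c) cs

def tedges (g : Int × Int) : List Char → List (Int × Int × Int × Int)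
  | [] => []
  | c :: cs => aedge g c :: tedges (pmove g c) cs

theorem aStep_eq (st : (Int × Int) × PySem.Set (Int × Int) × PySem.Set (Int × Int × Int × Int)) (c : Char) :
    aStep st c = (pmove st.1 c, PySem.Set.add st.2.1 (pmove st.1 c), PySem.Set.add st.2.2 (aedge st.1 c)) := by
  simp only [aStep, pmove, aedge]
  split_ifs <;> rfl

theorem afold (cs : List Char) (g : Int × Int) (S : PySem.Set (Int × Int))
    (E : PySem.Set (Int × Int × Int × Int)) :
    cs.foldl aStep (g, S, E) =
      (cs.foldl pmove g, (tpath g cs).foldl PySem.Set.add S, (tedges g cs).foldl PySem.Set.add E) := by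
  induction cs generalizing g S E with
  | nil => rfl
  | cons c cs ih => simp only [List.foldl_cons, aStep_eq, tpath, tedges, ih]

theorem pmove_shift (g d : Int × Int) (c : Char) :
    pmove (g.1 + d.1, g.2 + d.2) c = ((pmove g c).1 + d.1, (pmove g c).2 + d.2) := by
  simp only [pmove]; split_ifs <;> simp <;> ring

theorem aedge_shift (g d : Int × Int) (c : Char) :
    aedge (g.1 + d.1, g.2 + d.2) c =
      ((aedge g c).1 + d.1, (aedge g c).2.1 + d.2, (aedge g c).2.2.1 + d.1, (aedge g c).2.2.2 + d.2) := by
  simp only [aedge]; split_ifs <;> simp <;> ring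

theorem tpath_shift (cs : List Char) (g d : Int × Int) :
    tpath (g.1 + d.1, g.2 + d.2) cs = (tpath g cs).map (fun p => (p.1 + d.1, p.2 + d.2)) := by
  induction cs generalizing g with
  | nil => rfl
  | cons c cs ih => simp only [tpath, pmove_shift, List.map_cons, ih]

theorem tedges_shift (cs : List Char) (g d : Int × Int) :
    tedges (g.1 + d.1, g.2 + d.2) cs =
      (tedges g cs).map (fun e => (e.1 + d.1, e.2.1 + d.2, e.2.2.1 + d.1, e.2.2.2 + d.2)) := by
  induction cs generalizing g with
  | nil => rfl
  | cons c cs ih => simp only [tedges, pmove_shift, aedge_shift, List.map_cons, ih]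

theorem foldl_pmove_shift (cs : List Char) (g d : Int × Int) :
    cs.foldl pmove (g.1 + d.1, g.2 + d.2) =
      ((cs.foldl pmove g).1 + d.1, (cs.foldl pmove g).2 + d.2) := by
  induction cs generalizing g with
  | nil => rfl
  | cons c cs ih => simp only [List.foldl_cons, pmove_shift, ih]

theorem tpath_append (l₁ l₂ : List Char) (g : Int × Int) :
    tpath g (l₁ ++ l₂) = tpath g l₁ ++ tpath (l₁.foldl pmove g) l₂ := by
  induction l₁ generalizing g with
  | nil => rfl
  | cons c cs ih => simp only [List.cons_append, tpath, List.foldl_cons, ih]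

theorem tedges_append (l₁ l₂ : List Char) (g : Int × Int) :
    tedges g (l₁ ++ l₂) = tedges g l₁ ++ tedges (l₁.foldl pmove g) l₂ := by
  induction l₁ generalizing g with
  | nil => rfl
  | cons c cs ih => simp only [List.cons_append, tedges, List.foldl_cons, ih]

theorem bLeaf_eq (c : Char) : bLeaf c = (pmove (0, 0) c, tpath (0, 0) [c], tedges (0, 0) [c]) := by
  simp only [bLeaf, pmove, aedge, tpath, tedges]
  split_ifs <;> rfl

-- the divide-and-conquer summary computes exactly the from-origin displacement, path and edges
theorem bSummarize_eq (l : List Char) :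
    bSummarize l = (l.foldl pmove (0, 0), tpath (0, 0) l, tedges (0, 0) l) := by
  induction l using bSummarize.induct with
  | case1 => rw [bSummarize]; rfl
  | case2 c => rw [bSummarize]; exact bLeaf_eq c
  | case3 a b rest mid ih1 ih2 =>
    rw [bSummarize]
    have hsplit := List.take_append_drop ((a :: b :: rest).length / 2) (a :: b :: rest)
    simp only [show mid = (a :: b :: rest).length / 2 from rfl] at ih1 ih2
    simp only [ih1, ih2]
    set t := List.take ((a :: b :: rest).length / 2) (a :: b :: rest) with ht
    set dr := List.drop ((a :: b :: rest).length / 2) (a :: b :: rest) with hd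
    set D := List.foldl pmove ((0 : Int), (0 : Int)) t with hD
    have h2 := foldl_pmove_shift dr (0, 0) D
    have hp := tpath_shift dr (0, 0) D
    have he := tedges_shift dr (0, 0) D
    simp only [zero_add, Prod.mk.eta] at h2 hp he
    conv_rhs => rw [← hsplit]
    rw [List.foldl_append, tpath_append, tedges_append, ← hD, h2, hp, he]
    simp [add_comm]

theorem gridsFold (t : List (Int × Int)) (g : Int × Int) :
    PySem.Set.ofList (g :: t) = t.foldl PySem.Set.add (PySem.Set.ofList [g]) := by
  simp [PySem.Set.ofList_eq_foldl, List.foldl_cons]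

-- ===== VERDICT =====
theorem gridify_spec : Claim_equal_gridify := by
  intro moves _
  show gridify moves = gridify_alt moves
  cases h : moves.toList with
  | nil => simp [gridify, gridify_alt, h]; decide
  | cons a rest =>
    simp only [gridify, gridify_alt, h, afold, bSummarize_eq]
    rw [gridsFold (tpath (0, 0) (a :: rest)) (0, 0)]
    simp [PySem.Set.ofList_eq_foldl]
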